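-- pv_equiv track=rewrite | github.com/TopWebGhost/Angular-Influencer | Projects/miami_metro/platformdatafetcher/google_plus.py | _clean_up_js
-- ===== SOURCE A (Python) =====
-- def _clean_up_js(js_data):
--     '''
--     Port of the CleanupGoogleJSON object here:
--     https://github.com/gyurisc/dotnet.googleplus/blob/master/GooglePlus/GoogleUtils.cs
--     '''
--     # Clean up Anti-XSS junk at the beginning
--     if len(js_data) > 5:
--         js_data = js_data[5:]
--
--     last_char = None
--     in_string = False
--     in_escape = False
--
--     result = []
--
--     for current_char in js_data:
--         if current_char.isspace() and not in_string:
--             continue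
--
--         if in_string:
--             if in_escape:
--                 result.append(current_char)
--                 in_escape = False
--             elif current_char == '\\':
--                 result.append(current_char)
--                 in_escape = True
--             elif current_char == '"':
--                 result.append(current_char)
--                 in_string = False
--             else:
--                 result.append(current_char)
--
--             last_char = current_char
--             continue
--
--         if current_char == '"':
--             result.append(current_char)
--             in_string = True
--         elif current_char == ',':
--             if last_char == ',' or last_char == '[' or last_char == '{':
--                 result.append('null')
--             result.append(current_char)
--         elif current_char == ']' or current_char == '}':
--             if last_char == ',':
--                 result.append('null')
--             result.append(current_char)
--         else:
--             result.append(current_char)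
--
--         last_char = current_char
--
--     return ''.join(result)
-- ===== SOURCE B (Python) =====
-- def _clean_up_js(js_data):
--     # Index-based scan with a nested loop that consumes whole string
--     # literals, instead of A's in_string/in_escape boolean state machine.
--     if len(js_data) > 5:
--         js_data = js_data[5:]
--     out = []
--     last_char = None
--     i = 0
--     n = len(js_data)
--     while i < n:
--         c = js_data[i]
--         if c == '"':
--             out.append(c)
--             i += 1
--             while i < n:
--                 d = js_data[i]
--                 out.append(d)
--                 if d == '\\':
--                     if i + 1 < n:
--                         out.append(js_data[i + 1])
--                     i += 2
--                 elif d == '"':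
--                     i += 1
--                     break
--                 else:
--                     i += 1
--             last_char = '"'
--             continue
--         if c.isspace():
--             i += 1
--             continue
--         if c == ',':
--             if last_char in (',', '[', '{'):
--                 out.append('null')
--             out.append(c)
--         elif c == ']' or c == '}':
--             if last_char == ',':
--                 out.append('null')
--             out.append(c)
--         else:
--             out.append(c)
--         last_char = c
--         i += 1
--     return ''.join(out)
-- ===== Notes on version B (the rewrite author's own statement) =====
-- stated objective: alternative
-- what changed: Replaced A's per-character in_string/in_escape boolean state machine (a single for-loop carrying three state flags) by an index-based scan whose nested inner loop consumes an entire string literal (handling the escape by taking two characters at once), so string-mode state flags disappear.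
import Mathlib
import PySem

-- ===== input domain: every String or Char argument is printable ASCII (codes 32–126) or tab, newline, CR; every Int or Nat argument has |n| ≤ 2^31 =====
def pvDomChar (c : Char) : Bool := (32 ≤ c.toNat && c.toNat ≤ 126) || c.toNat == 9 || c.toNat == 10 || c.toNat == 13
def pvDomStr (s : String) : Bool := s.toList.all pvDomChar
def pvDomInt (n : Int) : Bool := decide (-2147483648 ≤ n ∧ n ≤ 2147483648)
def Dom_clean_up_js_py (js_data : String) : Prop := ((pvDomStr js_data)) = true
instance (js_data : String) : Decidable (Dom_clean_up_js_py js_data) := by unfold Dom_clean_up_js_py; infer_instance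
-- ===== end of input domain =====

-- B replaces A's in_string/in_escape flag state machine by an index-style scan whose
-- nested loop consumes whole string literals; same output (objective: alternative).

-- ===== PORT A =====
-- state tuple: (last_char, in_string, in_escape, result); one call = one loop iteration
def cleanAStep (st : Option Char × Bool × Bool × List Char) (c : Char) :
    Option Char × Bool × Bool × List Char :=
  let (last, inStr, inEsc, res) := st
  if PySem.Chars.isspace c && !inStr then (last, inStr, inEsc, res)
  else if inStr then
    if inEsc then (some c, inStr, false, res ++ [c])
    else if c = '\\' then (some c, inStr, true, res ++ [c])
    else if c = '"' then (some c, false, inEsc, res ++ [c])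
    else (some c, inStr, inEsc, res ++ [c])
  else if c = '"' then (some c, true, inEsc, res ++ [c])
  else if c = ',' then
    (some c, inStr, inEsc,
      (if last = some ',' ∨ last = some '[' ∨ last = some '{' then res ++ "null".toList else res) ++ [c])
  else if c = ']' ∨ c = '}' then
    (some c, inStr, inEsc, (if last = some ',' then res ++ "null".toList else res) ++ [c])
  else (some c, inStr, inEsc, res ++ [c])

def clean_up_js_py (js_data : String) : String :=
  let l := js_data.toList
  let l := if l.length > 5 then PySem.List.slice l (some 5) none else l
  String.ofList (l.foldl cleanAStep (none, false, false, [])).2.2.2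

-- ===== PORT B =====
-- inner while loop: consumes a whole string literal, returning (emitted chars, rest of input)
def cleanBInner : List Char → List Char × List Char
  | [] => ([], [])
  | d :: rest =>
    if d = '\\' then
      match rest with
      | [] => ([d], [])
      | e :: rest' => let p := cleanBInner rest'; (d :: e :: p.1, p.2)
    else if d = '"' then ([d], rest)
    else let p := cleanBInner rest; (d :: p.1, p.2)

-- bound needed for cleanBOuter's termination
theorem cleanBInner_snd_length_le : ∀ l : List Char, (cleanBInner l).2.length ≤ l.length := by
  intro l
  induction l using cleanBInner.induct with
  | case1 => simp [cleanBInner]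
  | case2 => simp [cleanBInner]
  | case3 e rest' ih => rw [cleanBInner.eq_def]; simp; omega
  | case4 rest' h => rw [cleanBInner.eq_def]; simp
  | case5 e rest' h1 h2 ih => rw [cleanBInner.eq_def]; simp [h1, h2]; omega
-- outer while loop over the remaining input, carrying last_char
def cleanBOuter : List Char → Option Char → List Char
  | [], _ => []
  | c :: rest, last =>
    if c = '"' then
      let p := cleanBInner rest
      (c :: p.1) ++ cleanBOuter p.2 (some '"')
    else if PySem.Chars.isspace c then cleanBOuter rest last
    else if c = ',' then
      (if last = some ',' ∨ last = some '[' ∨ last = some '{' then "null".toList else []) ++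
        c :: cleanBOuter rest (some c)
    else if c = ']' ∨ c = '}' then
      (if last = some ',' then "null".toList else []) ++ c :: cleanBOuter rest (some c)
    else c :: cleanBOuter rest (some c)
termination_by l _ => l.length
decreasing_by
  · exact Nat.lt_succ_of_le (cleanBInner_snd_length_le rest)
  all_goals simp


def clean_up_js_py_alt (js_data : String) : String :=
  let l := js_data.toList
  let l := if l.length > 5 then PySem.List.slice l (some 5) none else l
  String.ofList (cleanBOuter l none)

-- ===== PRECONDITION & SPEC =====
def Spec_clean_up_js_py (js_data : String) (out : String) : Prop := out = clean_up_js_py_alt js_data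
instance (js_data : String) (out : String) : Decidable (Spec_clean_up_js_py js_data out) := by unfold Spec_clean_up_js_py; infer_instance

-- ===== CLAIM (what is proved, stated in full; the proofs are below) =====
def Claim_equal_clean_up_js_py : Prop := ∀ (js_data : String), Dom_clean_up_js_py js_data → Spec_clean_up_js_py js_data (clean_up_js_py js_data)

-- ===== LEMMAS AND PROOFS =====
theorem foldA_string (l : List Char) :
    ∀ (last : Option Char) (res : List Char),
      (l.foldl cleanAStep (last, true, false, res)).2.2.2 =
        ((cleanBInner l).2.foldl cleanAStep
          (some '"', false, false, res ++ (cleanBInner l).1)).2.2.2 := by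
  induction l using cleanBInner.induct with
  | case1 => intro last res; simp [cleanBInner]
  | case2 => intro last res; simp [cleanBInner, cleanAStep]
  | case3 e rest' ih =>
    intro last res
    rw [cleanBInner.eq_def]
    simp only [List.foldl, cleanAStep]
    simp [ih]
  | case4 rest' h =>
    intro last res
    rw [cleanBInner.eq_def]
    simp [cleanAStep]
  | case5 e rest' h1 h2 ih =>
    intro last res
    rw [cleanBInner.eq_def]
    simp only [List.foldl, cleanAStep]
    simp [h1, h2, ih]

theorem foldA_eq_outer (l : List Char) :
    ∀ (last : Option Char) (res : List Char),
      (l.foldl cleanAStep (last, false, false, res)).2.2.2 = res ++ cleanBOuter l last := by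
  induction l, (none : Option Char) using cleanBOuter.induct with
  | case1 _ => intro last res; simp [cleanBOuter]
  | case2 rest last0 p ih =>
    intro last res
    rw [cleanBOuter.eq_def]
    simp only [List.foldl, cleanAStep]
    simp only [show PySem.Chars.isspace '"' = false from by decide, Bool.false_and,
      Bool.false_eq_true, if_false, if_true]
    rw [foldA_string]
    have ih2 : ∀ (last : Option Char) (res : List Char),
        (List.foldl cleanAStep (last, false, false, res) (cleanBInner rest).2).2.2.2 =
          res ++ cleanBOuter (cleanBInner rest).2 last := ih
    rw [ih2]
    simp
  | case3 c rest last0 hq hs ih =>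
    intro last res
    rw [cleanBOuter.eq_def]
    simp only [List.foldl, cleanAStep]
    simp [hq, hs, ih]
  | case4 rest last0 hq hs ih =>
    intro last res
    rw [cleanBOuter.eq_def]
    simp only [List.foldl, cleanAStep]
    simp only [hq, hs] at *
    simp [ih]
    split_ifs <;> simp
  | case5 c rest last0 hq hs hc hbr ih =>
    intro last res
    rw [cleanBOuter.eq_def]
    simp only [List.foldl, cleanAStep]
    simp [hq, hs, hc, hbr, ih]
    split_ifs <;> simp
  | case6 c rest last0 hq hs hc hbr ih =>
    intro last res
    rw [cleanBOuter.eq_def]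
    simp only [List.foldl, cleanAStep]
    simp [hq, hs, hc, hbr, ih]

-- ===== VERDICT (by name: the statement is the Claim_ definition above) =====
theorem clean_up_js_py_spec : Claim_equal_clean_up_js_py := by
  intro s _
  unfold Spec_clean_up_js_py clean_up_js_py clean_up_js_py_alt
  simp only [foldA_eq_outer, List.nil_append]
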